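-- pv_equiv track=rewrite | github.com/LolSayna/LearningPatternsfromTextualData | src/generate.py | canonicalForm
-- ===== SOURCE A (Python) =====
-- def canonicalForm(pattern):
--     # transforms the pattern into canonical form, max number of variables is limited by alphabet
--
--     pattern = list(pattern)
--
--     conversion = {}
--     variableName = "A"
--
--     for i, c in enumerate(pattern):
--         if c.isupper():
--             try:
--                 pattern[i] = conversion[c]
--             except KeyError:
--                 pattern[i] = conversion[c] = variableName
--                 variableName = chr(ord(variableName) + 1)
--
--     return "".join(pattern)
-- ===== SOURCE B (Python) =====
-- def canonicalForm(pattern):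
--     # Closed form per character, no running state: an uppercase c maps to
--     # chr(ord('A') + r) where r = number of distinct uppercase characters
--     # occurring strictly before c's first occurrence.
--     s = list(pattern)
--
--     def letter(c):
--         j = s.index(c)
--         return chr(ord("A") + len({d for d in s[:j] if d.isupper()}))
--
--     return "".join(letter(c) if c.isupper() else c for c in s)
-- ===== Notes on version B (the rewrite author's own statement) =====
-- stated objective: alternative
-- what changed: Replaces A's stateful single pass (dict cache + sequentially incremented variableName, in-place list mutation) with a stateless per-character closed form: each uppercase c is renamed to chr(ord('A') + r) where r is the number of distinct uppercase characters in the slice before c's first occurrence (s[:s.index(c)]), recomputed independently for every position.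
import Mathlib
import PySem

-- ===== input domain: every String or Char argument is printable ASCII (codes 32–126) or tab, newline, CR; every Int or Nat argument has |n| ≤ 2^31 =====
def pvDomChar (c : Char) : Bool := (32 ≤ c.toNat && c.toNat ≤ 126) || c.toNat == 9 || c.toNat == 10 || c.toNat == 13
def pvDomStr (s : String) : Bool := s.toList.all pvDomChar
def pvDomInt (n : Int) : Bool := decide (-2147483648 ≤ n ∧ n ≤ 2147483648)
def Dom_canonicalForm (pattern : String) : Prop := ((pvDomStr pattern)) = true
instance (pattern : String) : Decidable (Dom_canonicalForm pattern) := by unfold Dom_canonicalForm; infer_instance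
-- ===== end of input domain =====

-- B replaces A's stateful pass (dict cache + incremented variableName) with a stateless
-- per-character closed form: rank = distinct uppercase chars before the first occurrence
-- (objective: alternative; B is quadratic, not faster).

-- ===== PORT A =====
-- A's loop over enumerate(pattern): in-place assignment pattern[i] = … is rendered as
-- rebuilding the list position by position with the same dict/variableName state.
def canonAuxA : List Char → PySem.Dict Char Char → Char → List Char
  | [], _, _ => []
  | c :: rest, conv, v =>
    if PySem.Chars.isupper c then
      match conv.get? c with
      | some r => r :: canonAuxA rest conv v
      | none => v :: canonAuxA rest (conv.insert c v) (Char.ofNat (v.toNat + 1))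
    else c :: canonAuxA rest conv v

def canonicalForm (pattern : String) : String :=
  String.ofList (canonAuxA pattern.toList PySem.Dict.empty 'A')

-- ===== PORT B =====
-- Source B's letter(c): chr(ord('A') + len({d for d in s[:s.index(c)] if d.isupper()})).
-- s.index(c) is only called with c ∈ s, so it never raises; its port index? is some there
-- and the .getD 0 default is never used.
def canonLetterB (s : List Char) (c : Char) : Char :=
  Char.ofNat ('A'.toNat +
    (PySem.Set.ofList
      ((PySem.List.slice s none (some (((PySem.List.index? s c).getD 0 : Nat) : Int))).filter
        (fun d => PySem.Chars.isupper d))).length)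

def canonicalForm_alt (pattern : String) : String :=
  let s := pattern.toList
  String.ofList (s.map (fun c => if PySem.Chars.isupper c then canonLetterB s c else c))

-- ===== PRECONDITION & SPEC =====
def Spec_canonicalForm (pattern : String) (out : String) : Prop := out = canonicalForm_alt pattern
instance (pattern : String) (out : String) : Decidable (Spec_canonicalForm pattern out) := by unfold Spec_canonicalForm; infer_instance

-- ===== CLAIM (what is proved, stated in full; the proofs are below) =====
def Claim_equal_canonicalForm : Prop := ∀ (pattern : String), Dom_canonicalForm pattern → Spec_canonicalForm pattern (canonicalForm pattern)

-- ===== LEMMAS AND PROOFS =====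

-- number of distinct uppercase chars in a list (the value B's set-comprehension length computes)
def uppersCount (p : List Char) : Nat :=
  (PySem.Set.ofList (p.filter (fun d => PySem.Chars.isupper d))).length

-- at most 26 distinct uppercase ASCII characters exist
theorem nodup_upper_length_le (l : List Char) (hnd : l.Nodup)
    (hup : ∀ k ∈ l, PySem.Chars.isupper k = true) : l.length ≤ 26 := by
  have hmapnd : (l.map Char.toNat).Nodup := by
    refine List.Nodup.map ?_ hnd
    intro a b h
    apply Char.ext
    unfold Char.toNat at h
    exact UInt32.toNat_inj.mp h
  have hsub : (l.map Char.toNat).toFinset ⊆ Finset.Icc 65 90 := by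
    intro n hn
    simp only [List.mem_toFinset, List.mem_map] at hn
    obtain ⟨c, hc, rfl⟩ := hn
    have := hup c hc
    simp only [PySem.Chars.isupper, Bool.and_eq_true, decide_eq_true_eq] at this
    have h1 : ('A' : Char).toNat ≤ c.toNat := this.1
    have h2 : c.toNat ≤ ('Z' : Char).toNat := this.2
    simp only [Finset.mem_Icc]
    exact ⟨h1, h2⟩
  have hcard : (l.map Char.toNat).toFinset.card = l.length := by
    rw [List.toFinset_card_of_nodup hmapnd, List.length_map]
  have := Finset.card_le_card hsub
  rw [hcard] at this
  simpa [Nat.card_Icc] using this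

theorem uppersCount_le (p : List Char) : uppersCount p ≤ 26 := by
  apply nodup_upper_length_le _ (PySem.Set.nodup_ofList _)
  intro k hk
  have := (PySem.Set.mem_ofList _ _).mp hk
  exact (List.mem_filter.mp this).2

theorem toNat_ofNat_valid (n : Nat) (h : n < 55296) : (Char.ofNat n).toNat = n := by
  simp [Char.ofNat, Nat.isValidChar, h]

-- Set.ofList of an appended element: unchanged if present, appended if new
theorem ofList_append_mem (xs : List Char) (c : Char) (h : c ∈ xs) :
    PySem.Set.ofList (xs ++ [c]) = PySem.Set.ofList xs := by
  rw [PySem.Set.ofList_eq_foldl, List.foldl_append, ← PySem.Set.ofList_eq_foldl]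
  have hm : c ∈ PySem.Set.ofList xs := (PySem.Set.mem_ofList xs c).mpr h
  simp [PySem.Set.add, PySem.Set.contains, hm]

theorem ofList_append_not_mem (xs : List Char) (c : Char) (h : c ∉ xs) :
    PySem.Set.ofList (xs ++ [c]) = PySem.Set.ofList xs ++ [c] := by
  rw [PySem.Set.ofList_eq_foldl, List.foldl_append, ← PySem.Set.ofList_eq_foldl]
  have hc : c ∉ PySem.Set.ofList xs := fun hm => h ((PySem.Set.mem_ofList xs c).mp hm)
  simp [PySem.Set.add, PySem.Set.contains, hc]

-- uppersCount over an appended character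
theorem uppersCount_append_upper_mem (p : List Char) (c : Char)
    (hc : PySem.Chars.isupper c = true) (h : c ∈ p) : uppersCount (p ++ [c]) = uppersCount p := by
  unfold uppersCount
  rw [List.filter_append]
  simp only [List.filter_cons, hc, if_true, List.filter_nil]
  rw [ofList_append_mem _ _ (List.mem_filter.mpr ⟨h, hc⟩)]

theorem uppersCount_append_upper_not_mem (p : List Char) (c : Char)
    (hc : PySem.Chars.isupper c = true) (h : c ∉ p) :
    uppersCount (p ++ [c]) = uppersCount p + 1 := by
  unfold uppersCount
  rw [List.filter_append]
  simp only [List.filter_cons, hc, if_true, List.filter_nil]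
  rw [ofList_append_not_mem _ _ (fun hm => h (List.mem_filter.mp hm).1)]
  simp

theorem uppersCount_append_not_upper (p : List Char) (c : Char)
    (hc : PySem.Chars.isupper c = false) : uppersCount (p ++ [c]) = uppersCount p := by
  unfold uppersCount
  rw [List.filter_append]
  simp [hc]

-- B's letter at a first occurrence: with s = p ++ c :: l and c ∉ p, rank = uppersCount p
theorem canonLetterB_first (p l : List Char) (c : Char) (h : c ∉ p) :
    canonLetterB (p ++ c :: l) c = Char.ofNat ('A'.toNat + uppersCount p) := by
  unfold canonLetterB
  have hidx : PySem.List.index? (p ++ c :: l) c = some p.length :=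
    (PySem.List.index?_eq_some_iff _ _ _).mpr ⟨p, l, rfl, rfl, h⟩
  rw [hidx]
  simp only [Option.getD_some]
  rw [PySem.List.slice_to_natCast, List.take_left]
  rfl

-- main invariant: A's interleaved loop equals B's per-character closed form,
-- where p is the already-processed prefix (s = p ++ l)
theorem canon_main (s : List Char) (l p : List Char) (conv : PySem.Dict Char Char) (v : Char)
    (hs : s = p ++ l)
    (H : ∀ c, conv.get? c =
      if PySem.Chars.isupper c = true ∧ c ∈ p then some (canonLetterB s c) else none)
    (hv : v = Char.ofNat ('A'.toNat + uppersCount p)) :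
    canonAuxA l conv v = l.map (fun c => if PySem.Chars.isupper c then canonLetterB s c else c) := by
  induction l generalizing p conv v with
  | nil => simp [canonAuxA]
  | cons c rest ih =>
    by_cases hc : PySem.Chars.isupper c = true
    · have Hc := H c
      cases hget : conv.get? c with
      | some r =>
        have hmem : c ∈ p := by
          rw [hget] at Hc
          by_contra hm
          simp [hc, hm] at Hc
        have hr : r = canonLetterB s c := by
          rw [hget] at Hc
          simp [hc, hmem] at Hc
          exact Hc
        simp only [canonAuxA, hc, if_true, hget, List.map_cons]
        refine List.cons_eq_cons.mpr ⟨hr, ?_⟩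
        apply ih (p ++ [c]) conv v
        · simpa using hs
        · intro d
          rw [H d]
          by_cases hd : d = c
          · subst hd; simp [hc, hmem]
          · simp [List.mem_append, hd]
        · rw [hv, uppersCount_append_upper_mem p c hc hmem]
      | none =>
        have hnmem : c ∉ p := by
          intro hm
          rw [hget] at Hc
          simp [hc, hm] at Hc
        have hletter : canonLetterB s c = v := by
          rw [hs, canonLetterB_first p rest c hnmem, hv]
        have hcount : uppersCount p ≤ 25 := by
          have h1 := uppersCount_le (p ++ [c])
          rw [uppersCount_append_upper_not_mem p c hc hnmem] at h1
          omega
        have hvn : v.toNat = 'A'.toNat + uppersCount p := by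
          rw [hv]
          exact toNat_ofNat_valid _ (by simp [Char.toNat]; omega)
        simp only [canonAuxA, hc, if_true, hget, List.map_cons]
        refine List.cons_eq_cons.mpr ⟨hletter.symm, ?_⟩
        apply ih (p ++ [c]) (conv.insert c v) (Char.ofNat (v.toNat + 1))
        · simpa using hs
        · intro d
          by_cases hd : d = c
          · subst hd
            rw [PySem.Dict.get?_insert_self]
            simp [hc, hletter]
          · rw [PySem.Dict.get?_insert_of_ne _ _ hd, H d]
            simp [List.mem_append, hd]
        · rw [uppersCount_append_upper_not_mem p c hc hnmem, hvn]
          congr 1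
    · have hcf : PySem.Chars.isupper c = false := by simpa using hc
      simp only [canonAuxA, hcf, Bool.false_eq_true, if_false, List.map_cons]
      refine List.cons_eq_cons.mpr ⟨rfl, ?_⟩
      apply ih (p ++ [c]) conv v
      · simpa using hs
      · intro d
        rw [H d]
        by_cases hd : d = c
        · subst hd; simp [hcf]
        · simp [List.mem_append, hd]
      · rw [hv, uppersCount_append_not_upper p c hcf]

-- ===== VERDICT (by name: the statement is the Claim_ definition above) =====
theorem canonicalForm_spec : Claim_equal_canonicalForm := by
  intro pattern _
  unfold Spec_canonicalForm canonicalForm canonicalForm_alt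
  rw [canon_main pattern.toList pattern.toList [] PySem.Dict.empty 'A' rfl
    (by intro c; simp [PySem.Dict.get?_empty])
    (by decide)]
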